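-- pv_equiv track=rewrite | github.com/57Darling02/RailGraph2Gurobi | scripts/generate_case_library.py | build_station_neighbors
-- ===== SOURCE A (Python) =====
-- from typing import Dict, List, Sequence, Tuple
--
-- def build_station_neighbors(station_order: Sequence[str]) -> Dict[str, set[str]]:
--     neighbors: Dict[str, set[str]] = {station: set() for station in station_order}
--     for idx, station in enumerate(station_order):
--         if idx > 0:
--             neighbors[station].add(station_order[idx - 1])
--         if idx + 1 < len(station_order):
--             neighbors[station].add(station_order[idx + 1])
--     return neighbors
-- ===== SOURCE B (Python) =====
-- from typing import Dict, List, Sequence, Tuple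
--
-- def build_station_neighbors(station_order: Sequence[str]) -> Dict[str, set[str]]:
--     # Two-phase per-key gather: first index every station's occurrence positions,
--     # then build each station's neighbor set directly from its positions
--     # (no mutation of the result dict while scanning).
--     n = len(station_order)
--     occurrences: Dict[str, List[int]] = {}
--     for i, s in enumerate(station_order):
--         occurrences.setdefault(s, []).append(i)
--     return {
--         s: {station_order[j] for i in idxs for j in (i - 1, i + 1) if 0 <= j < n}
--         for s, idxs in occurrences.items()
--     }
-- ===== Notes on version B (the rewrite author's own statement) =====
-- stated objective: alternative
-- what changed: Replaced A's single mutating pass (per-index look-behind/look-ahead updates into a pre-initialised dict) by a two-phase per-key gather: first build an index of each station's occurrence positions, then a dict comprehension builds every station's neighbor set directly from its positions, with no incremental mutation of the result dict.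
import Mathlib
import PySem

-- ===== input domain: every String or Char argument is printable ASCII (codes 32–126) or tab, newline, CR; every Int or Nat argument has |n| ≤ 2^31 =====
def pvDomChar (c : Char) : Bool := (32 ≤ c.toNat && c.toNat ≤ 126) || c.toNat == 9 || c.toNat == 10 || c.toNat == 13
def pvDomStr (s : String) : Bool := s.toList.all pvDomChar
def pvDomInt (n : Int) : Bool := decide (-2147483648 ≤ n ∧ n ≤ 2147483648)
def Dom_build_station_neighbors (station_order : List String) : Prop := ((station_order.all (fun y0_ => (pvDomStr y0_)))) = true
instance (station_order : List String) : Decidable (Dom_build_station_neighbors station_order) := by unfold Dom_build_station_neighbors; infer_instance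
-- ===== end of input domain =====

-- B replaces A's single mutating pass (per-index look-behind/look-ahead updates into a
-- pre-initialised dict) by a two-phase per-key gather: first an index of each station's
-- occurrence positions, then a dict comprehension builds each station's neighbor set
-- directly from its positions; objective: alternative.

-- ===== PORT A =====
-- the body of A's enumerate loop: idx > 0 → add station_order[idx-1]; idx+1 < len → add station_order[idx+1]
def stepA (so : List String) (d : PySem.Dict String (List String)) (p : Int × String) : PySem.Dict String (List String) :=
  let d1 := if 0 < p.1 then d.modify p.2 [] (fun s => PySem.Set.add s (PySem.List.pyGetD so (p.1 - 1) "")) else d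
  if p.1 + 1 < PySem.List.len so then d1.modify p.2 [] (fun s => PySem.Set.add s (PySem.List.pyGetD so (p.1 + 1) "")) else d1

def build_station_neighbors (station_order : List String) : List (String × List String) :=
  let neighbors : PySem.Dict String (List String) :=
    station_order.foldl (fun d s => d.insert s PySem.Set.empty) PySem.Dict.empty
  ((PySem.List.enumerate station_order).foldl (stepA station_order) neighbors).items

-- ===== PORT B =====
-- phase 1 of Source B: occurrences.setdefault(s, []).append(i) over enumerate(station_order)
def occDict (so : List String) : PySem.Dict String (List Int) :=
  (PySem.List.enumerate so).foldl (fun d p => d.modify p.2 [] (fun l => l ++ [p.1])) PySem.Dict.empty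

-- the set comprehension of Source B: {so[j] for i in idxs for j in (i-1, i+1) if 0 <= j < n}
def gatherB (so : List String) (idxs : List Int) : List String :=
  idxs.foldl (fun acc i =>
    [i - 1, i + 1].foldl (fun acc j =>
      if 0 ≤ j ∧ j < PySem.List.len so then PySem.Set.add acc (PySem.List.pyGetD so j "") else acc) acc)
    PySem.Set.empty

-- the outer dict comprehension: {s: {...} for s, idxs in occurrences.items()}
def build_station_neighbors_alt (station_order : List String) : List (String × List String) :=
  ((occDict station_order).items.foldl
    (fun d p => d.insert p.1 (gatherB station_order p.2)) PySem.Dict.empty).items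

-- ===== PRECONDITION & SPEC =====
def Spec_build_station_neighbors (station_order : List String) (out : List (String × List String)) : Prop := out = build_station_neighbors_alt station_order
instance (station_order : List String) (out : List (String × List String)) : Decidable (Spec_build_station_neighbors station_order out) := by unfold Spec_build_station_neighbors; infer_instance

-- ===== CLAIM (what is proved, stated in full; the proofs are below) =====
def Claim_equal_build_station_neighbors : Prop := ∀ (station_order : List String), Dom_build_station_neighbors station_order → Spec_build_station_neighbors station_order (build_station_neighbors station_order)

-- ===== LEMMAS AND PROOFS =====

-- A's per-index update restricted to one key s (what stepA does to the value at s)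
def stepVal (so : List String) (acc : List String) (i : Int) : List String :=
  let a1 := if 0 < i then PySem.Set.add acc (PySem.List.pyGetD so (i - 1) "") else acc
  if i + 1 < PySem.List.len so then PySem.Set.add a1 (PySem.List.pyGetD so (i + 1) "") else a1

-- L1: an insert-loop whose values are a function of the key alone builds
-- (Set.update d.keys l).map (fun s => (s, f s)) from a dict already of that shape.
theorem items_insert_loop (f : String → List String) :
    ∀ (l : List String) (d : PySem.Dict String (List String)),
      d.items = d.keys.map (fun s => (s, f s)) →
      (l.foldl (fun d s => d.insert s (f s)) d).items
        = (PySem.Set.update d.keys l).map (fun s => (s, f s)) := by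
  intro l
  induction l with
  | nil => intro d hd; simpa [PySem.Set.update] using hd
  | cons x xs ih =>
    intro d hd
    rw [List.foldl_cons]
    have hupd : PySem.Set.update d.keys (x :: xs) = PySem.Set.update (PySem.Set.add d.keys x) xs := by
      simp [PySem.Set.update]
    rw [hupd]
    by_cases hc : d.contains x = true
    · have hkeys : (d.insert x (f x)).keys = d.keys := PySem.Dict.keys_insert_of_contains d (f x) hc
      have hmemx : x ∈ d.keys := by
        rw [PySem.Dict.contains_eq_decide_mem_keys] at hc; simpa using hc
      have hadd : PySem.Set.add d.keys x = d.keys := by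
        simp [PySem.Set.add, PySem.Set.contains, hmemx]
      have hitems : (d.insert x (f x)).items = d.keys.map (fun s => (s, f s)) := by
        rw [PySem.Dict.items_insert_of_contains d (f x) hc, hd, List.map_map]
        apply List.map_congr_left
        intro s _
        by_cases hsx : s = x
        · simp [hsx]
        · simp [Function.comp, hsx]
      rw [ih _ (by rw [hitems, hkeys]), hkeys, hadd]
    · have hc' : d.contains x = false := by simpa using hc
      have hkeys : (d.insert x (f x)).keys = d.keys ++ [x] := PySem.Dict.keys_insert_of_not_contains d (f x) hc'
      have hmemx : x ∉ d.keys := by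
        rw [PySem.Dict.contains_eq_decide_mem_keys] at hc'; simpa using hc'
      have hadd : PySem.Set.add d.keys x = d.keys ++ [x] := by
        simp [PySem.Set.add, PySem.Set.contains, hmemx]
      have hitems : (d.insert x (f x)).items = (d.keys ++ [x]).map (fun s => (s, f s)) := by
        rw [PySem.Dict.items_insert_of_not_contains d (f x) hc', hd]; simp
      rw [ih _ (by rw [hitems, hkeys]), hkeys, hadd]

-- L0: every value in the initial dict is [] (and getD defaults to [] off the keys)
theorem getD_init (l : List String) :
    ∀ (d : PySem.Dict String (List String)) (s : String), d.getD s [] = [] →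
      (l.foldl (fun d s => d.insert s PySem.Set.empty) d).getD s [] = [] := by
  induction l with
  | nil => intro d s hd; simpa using hd
  | cons x xs ih =>
    intro d s hd
    rw [List.foldl_cons]
    apply ih
    rw [PySem.Dict.getD_insert]
    split_ifs with h
    · rfl
    · exact hd

-- L2a: stepA keeps keys unchanged when its key is already present
theorem keys_stepA (so : List String) (d : PySem.Dict String (List String)) (p : Int × String)
    (hc : d.contains p.2 = true) : (stepA so d p).keys = d.keys := by
  unfold stepA
  have hmod : ∀ (f : List String → List String), (d.modify p.2 [] f).keys = d.keys := by
    intro f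
    rw [PySem.Dict.keys_modify]
    exact PySem.Dict.keys_insert_of_contains d _ hc
  have hmodc : ∀ (f : List String → List String), (d.modify p.2 [] f).contains p.2 = true := by
    intro f; rw [PySem.Dict.contains_modify]; simp
  split_ifs with h1 h2 h2
  · rw [PySem.Dict.keys_modify, PySem.Dict.keys_insert_of_contains _ _ (hmodc _), hmod]
  · exact hmod _
  · rw [PySem.Dict.keys_modify, PySem.Dict.keys_insert_of_contains _ _ hc]
  · rfl

-- L2: A's whole loop keeps keys unchanged when every touched key is present
theorem keys_fold_stepA (so : List String) :
    ∀ (ps : List (Int × String)) (d : PySem.Dict String (List String)),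
      (∀ p ∈ ps, d.contains p.2 = true) →
      (ps.foldl (stepA so) d).keys = d.keys := by
  intro ps
  induction ps with
  | nil => intro d _; rfl
  | cons q qs ih =>
    intro d hall
    have hq : d.contains q.2 = true := hall q (by simp)
    have hkeys : (stepA so d q).keys = d.keys := keys_stepA so d q hq
    rw [List.foldl_cons, ih _ ?_, hkeys]
    intro p hp
    rw [PySem.Dict.contains_eq_decide_mem_keys, hkeys, ← PySem.Dict.contains_eq_decide_mem_keys]
    exact hall p (List.mem_cons_of_mem _ hp)

-- L3a: what stepA does to the value stored at s
theorem getD_stepA (so : List String) (d : PySem.Dict String (List String)) (p : Int × String) (s : String) :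
    (stepA so d p).getD s [] = if p.2 == s then stepVal so (d.getD s []) p.1 else d.getD s [] := by
  unfold stepA stepVal
  by_cases hps : p.2 = s
  · subst hps
    simp only [beq_self_eq_true, if_true]
    split_ifs with h1 h2 h2
    · simp
    · simp
    · simp
    · rfl
  · have hbe : (p.2 == s) = false := by simpa using hps
    have hps' : ¬ (s = p.2) := fun h => hps h.symm
    simp only [hbe, Bool.false_eq_true, if_false]
    split_ifs with h1 h2 h2 <;>
      simp [PySem.Dict.getD_modify, hps']

-- L3: the value at s after A's loop is the fold of the updates whose key is s
theorem getD_fold_stepA (so : List String) :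
    ∀ (ps : List (Int × String)) (d : PySem.Dict String (List String)) (s : String),
      (ps.foldl (stepA so) d).getD s []
        = ps.foldl (fun acc p => if p.2 == s then stepVal so acc p.1 else acc) (d.getD s []) := by
  intro ps
  induction ps with
  | nil => intro d s; rfl
  | cons q qs ih =>
    intro d s
    rw [List.foldl_cons, List.foldl_cons, ih, getD_stepA]

-- L4a: the value the occurrence index stores at s is the list of s's positions
theorem getD_occ (so : List String) (s : String) :
    (occDict so).getD s []
      = ((PySem.List.enumerate so).filter (fun p => p.2 == s)).map (fun p => p.1) := by
  unfold occDict
  have hswap : (PySem.List.enumerate so).foldl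
        (fun d p => d.modify p.2 [] (fun l => l ++ [p.1])) PySem.Dict.empty
      = ((PySem.List.enumerate so).map (fun p => (p.2, p.1))).foldl
        (fun d p => d.modify p.1 [] (fun l => l ++ [p.2])) PySem.Dict.empty := by
    rw [List.foldl_map]
  rw [hswap, PySem.Dict.getD_foldl_modify_append, List.filter_map, List.map_map]
  simp [Function.comp_def]

-- L4b: the occurrence index is keyed by the distinct stations, in first-occurrence order
theorem keys_occ (so : List String) : (occDict so).keys = PySem.Set.ofList so := by
  unfold occDict
  rw [PySem.Dict.keys_foldl_modify_key (PySem.List.enumerate so) (fun p => p.2) []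
        (fun _ p l => l ++ [p.1]) PySem.Dict.empty]
  rw [PySem.List.map_snd_enumerate, PySem.Dict.keys_empty, PySem.Set.ofList_eq_foldl]
  rfl

-- L4c: B's gather over s's positions is A's per-key update fold
theorem gather_occ_eq (so : List String) (s : String) :
    gatherB so ((occDict so).getD s [])
      = (PySem.List.enumerate so).foldl
          (fun acc p => if p.2 == s then stepVal so acc p.1 else acc) [] := by
  rw [getD_occ]
  have hfil : (PySem.List.enumerate so).foldl
        (fun acc p => if p.2 == s then stepVal so acc p.1 else acc) []
      = ((PySem.List.enumerate so).filter (fun p => p.2 == s)).foldl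
          (fun acc p => stepVal so acc p.1) [] := by
    rw [List.foldl_filter]
  rw [hfil]
  unfold gatherB
  rw [List.foldl_map]
  apply PySem.List.foldl_congr_mem
  intro acc p hp
  have hp' := (List.mem_filter.mp hp).1
  rw [PySem.List.mem_enumerate_iff] at hp'
  obtain ⟨k, hk, rfl⟩ := hp'
  simp only [List.foldl_cons, List.foldl_nil, stepVal, PySem.List.len_eq, zero_add]
  split_ifs <;> first | rfl | (exfalso; omega)

-- L5: a dict with distinct keys is its key list paired with its values
theorem items_eq_keys_map_getD {ν : Type} (d : PySem.Dict String ν) (v0 : ν) (hnd : d.keys.Nodup) :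
    d.items = d.keys.map (fun k => (k, d.getD k v0)) := by
  apply List.ext_getElem
  · simp [PySem.Dict.keys]
  · intro i h1 h2
    have hmem : d.items[i] ∈ d.items := List.getElem_mem _
    have hkey : (d.keys.map (fun k => (k, d.getD k v0)))[i]
        = (d.items[i].1, d.getD d.items[i].1 v0) := by
      simp [PySem.Dict.keys]
    rw [hkey]
    have hv : d.getD d.items[i].1 v0 = d.items[i].2 :=
      PySem.Dict.getD_of_mem_items d (by simp) hnd v0
    rw [hv]

-- ===== VERDICT (by name: the statement is the Claim_ definition above) =====
theorem build_station_neighbors_spec : Claim_equal_build_station_neighbors := by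
  intro so _
  unfold Spec_build_station_neighbors build_station_neighbors build_station_neighbors_alt
  -- the initial dict of A
  set d0 : PySem.Dict String (List String) :=
    so.foldl (fun d s => d.insert s PySem.Set.empty) PySem.Dict.empty with hd0
  have hitems0 : d0.items = (PySem.Set.ofList so).map (fun s => (s, ([] : List String))) := by
    rw [hd0]
    have := items_insert_loop (fun _ => ([] : List String)) so PySem.Dict.empty (by rfl)
    simpa [PySem.Set.update, PySem.Set.ofList_eq_foldl, PySem.Set.empty] using this
  have hkeys0 : d0.keys = PySem.Set.ofList so := by
    simp [PySem.Dict.keys, hitems0, List.map_map, Function.comp_def]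
  have hnd0 : d0.keys.Nodup := by rw [hkeys0]; exact PySem.Set.nodup_ofList so
  have hcont : ∀ p ∈ PySem.List.enumerate so, d0.contains p.2 = true := by
    intro p hp
    rw [PySem.List.mem_enumerate_iff] at hp
    obtain ⟨k, hk, rfl⟩ := hp
    rw [PySem.Dict.contains_eq_decide_mem_keys, hkeys0]
    simp only [PySem.Set.mem_ofList, decide_eq_true_eq]
    exact List.getElem_mem hk
  set dA := (PySem.List.enumerate so).foldl (stepA so) d0 with hdA
  have hkeysA : dA.keys = PySem.Set.ofList so := by
    rw [hdA, keys_fold_stepA so _ d0 hcont, hkeys0]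
  have hndA : dA.keys.Nodup := by rw [hkeysA]; exact PySem.Set.nodup_ofList so
  have hgetD0 : ∀ s, d0.getD s [] = [] := by
    intro s; rw [hd0]; exact getD_init so PySem.Dict.empty s (by rfl)
  rw [items_eq_keys_map_getD dA [] hndA, hkeysA]
  have hfreshB : ∀ p ∈ (occDict so).items, (PySem.Dict.empty : PySem.Dict String (List String)).contains p.1 = false :=
    fun p _ => PySem.Dict.contains_empty p.1
  have hnodB : ((occDict so).items.map (fun p => p.1)).Nodup := by
    have : (occDict so).items.map (fun p => p.1) = (occDict so).keys := rfl
    rw [this, keys_occ]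
    exact PySem.Set.nodup_ofList so
  rw [PySem.Dict.items_foldl_insert_fresh (occDict so).items (fun p => p.1)
        (fun p => gatherB so p.2) PySem.Dict.empty hfreshB hnodB]
  have hoccnd : (occDict so).keys.Nodup := by rw [keys_occ]; exact PySem.Set.nodup_ofList so
  rw [items_eq_keys_map_getD (occDict so) [] hoccnd, keys_occ, List.map_map]
  have hempty : (PySem.Dict.empty : PySem.Dict String (List String)).items = [] := rfl
  simp only [hempty, List.nil_append, Function.comp_def]
  apply List.map_congr_left
  intro s _
  rw [gather_occ_eq, hdA, getD_fold_stepA, hgetD0]
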